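-- pv_equiv track=rewrite | github.com/jonwhittlestone/python-code-katas | python_workout/0731.py | move_punctuation_ending
-- ===== SOURCE A (Python) =====
-- def move_punctuation_ending(word) -> str:
--     letters = []
--     ending = ''
--     for ltr in word:
--         if ltr in [',', '!', '.']:
--             ending = ltr
--         else:
--             letters.append(ltr)
--     letters.append(ending)
--     return ''.join(letters)
-- ===== SOURCE B (Python) =====
-- def move_punctuation_ending(word) -> str:
--     def solve(s):
--         # returns (letters, ending) for s: letters = s without ',!.', ending = last such char or ''
--         if len(s) < 2:
--             if s and s in ',!.':
--                 return ('', s)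
--             return (s, '')
--         mid = len(s) // 2
--         l_letters, l_end = solve(s[:mid])
--         r_letters, r_end = solve(s[mid:])
--         return (l_letters + r_letters, r_end or l_end)
--
--     letters, ending = solve(word)
--     return letters + ending
-- ===== Notes on version B (the rewrite author's own statement) =====
-- stated objective: alternative
-- what changed: Replaced A's single left-to-right fused scan (letters accumulator plus last-seen ending variable) with a divide-and-conquer recursion: split the word in halves, solve each half to a (letters, ending) pair, and combine by concatenation with the right half's ending taking precedence.
import Mathlib
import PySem

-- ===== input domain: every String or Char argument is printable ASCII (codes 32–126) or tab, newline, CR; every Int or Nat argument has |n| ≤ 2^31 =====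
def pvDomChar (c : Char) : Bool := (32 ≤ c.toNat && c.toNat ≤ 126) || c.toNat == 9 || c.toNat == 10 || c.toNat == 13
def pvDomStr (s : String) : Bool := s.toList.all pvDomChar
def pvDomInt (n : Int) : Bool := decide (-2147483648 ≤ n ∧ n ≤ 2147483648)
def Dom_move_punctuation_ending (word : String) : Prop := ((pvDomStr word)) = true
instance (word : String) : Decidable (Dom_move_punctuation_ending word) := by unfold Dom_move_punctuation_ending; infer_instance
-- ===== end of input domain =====

-- B replaces A's single fused left-to-right scan with a divide-and-conquer recursion on
-- halves of the word (objective: alternative; same result, no speed claim).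

-- ===== PORT A =====
-- single pass: letters accumulator and 'ending' string, ending overwritten on each punctuation char
def move_punctuation_ending (word : String) : String :=
  let st := word.toList.foldl
    (fun (st : List Char × String) ltr =>
      if ltr ∈ [',', '!', '.'] then (st.1, String.ofList [ltr])
      else (st.1 ++ [ltr], st.2))
    ([], "")
  String.ofList st.1 ++ st.2

-- ===== PORT B =====
-- divide and conquer: solve each half to (letters, ending), combine with `r_end or l_end`
def mpeSolve (s : List Char) : List Char × String :=
  if h : 2 ≤ s.length then
    let mid := s.length / 2
    let l := mpeSolve (s.take mid)
    let r := mpeSolve (s.drop mid)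
    (l.1 ++ r.1, if r.2 = "" then l.2 else r.2)
  else
    match s with
    | [c] => if c ∈ [',', '!', '.'] then ([], String.ofList [c]) else ([c], "")
    | _ => ([], "")
termination_by s.length
decreasing_by
  · simp only [List.length_take]; omega
  · simp only [List.length_drop]; omega

def move_punctuation_ending_alt (word : String) : String :=
  let st := mpeSolve word.toList
  String.ofList st.1 ++ st.2

-- ===== PRECONDITION & SPEC =====
def Spec_move_punctuation_ending (word : String) (out : String) : Prop := out = move_punctuation_ending_alt word
instance (word : String) (out : String) : Decidable (Spec_move_punctuation_ending word out) := by unfold Spec_move_punctuation_ending; infer_instance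

-- ===== CLAIM (what is proved, stated in full; the proofs are below) =====
def Claim_equal_move_punctuation_ending : Prop := ∀ (word : String), Dom_move_punctuation_ending word → Spec_move_punctuation_ending word (move_punctuation_ending word)

-- ===== LEMMAS AND PROOFS =====

-- canonical form both programs compute: the non-punctuation chars, and the last punctuation char (or "")
def mpeEnding (s : List Char) : String :=
  match (s.filter (fun c => c ∈ [',', '!', '.'])).getLast? with
  | some c => String.ofList [c]
  | none => ""

theorem mpe_loop (l : List Char) (acc : List Char) (e : String) :
    l.foldl
      (fun (st : List Char × String) ltr =>
        if ltr ∈ [',', '!', '.'] then (st.1, String.ofList [ltr])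
        else (st.1 ++ [ltr], st.2))
      (acc, e)
    = (acc ++ l.filter (fun c => !(c ∈ [',', '!', '.'])),
       match (l.filter (fun c => c ∈ [',', '!', '.'])).getLast? with
       | some c => String.ofList [c]
       | none => e) := by
  induction l generalizing acc e with
  | nil => simp
  | cons x xs ih =>
    rw [List.foldl_cons]
    by_cases hx : x ∈ [',', '!', '.']
    · rw [if_pos hx, ih, List.filter_cons, List.filter_cons]
      have h1 : decide (x ∈ [',', '!', '.']) = true := by simpa using hx
      rw [h1, if_pos rfl]
      rw [if_neg (by simp : ¬((!true) = true))]
      rw [List.getLast?_cons]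
      cases h : (List.filter (fun c => decide (c ∈ [',', '!', '.'])) xs).getLast? <;> simp [h]
    · have h1 : decide (x ∈ [',', '!', '.']) = false := by simpa using hx
      rw [if_neg hx, ih, List.filter_cons, List.filter_cons, h1]
      simp [List.append_assoc]

theorem mpeEnding_append (a b : List Char) :
    mpeEnding (a ++ b) = if mpeEnding b = "" then mpeEnding a else mpeEnding b := by
  unfold mpeEnding
  rw [List.filter_append, List.getLast?_append]
  cases h : (b.filter (fun c => c ∈ [',', '!', '.'])).getLast? with
  | none => simp [h]
  | some c =>
    have : String.ofList [c] ≠ "" := by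
      intro hc
      have := congrArg String.toList hc
      simp at this
    simp [h, this]

theorem mpeSolve_eq (s : List Char) :
    mpeSolve s = (s.filter (fun c => !(c ∈ [',', '!', '.'])), mpeEnding s) := by
  induction s using mpeSolve.induct with
  | case1 s h mid ihl ihr =>
    rw [mpeSolve, dif_pos h]
    simp only
    rw [ihl, ihr]
    have hsplit : s.take mid ++ s.drop mid = s := List.take_append_drop _ _
    rw [← List.filter_append, ← mpeEnding_append, hsplit]
  | case2 c h hc h2 =>
    rw [mpeSolve, dif_neg h]
    simp only [List.mem_cons, List.not_mem_nil, or_false] at hc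
    rcases hc with h'|h'|h' <;> subst h' <;> simp [mpeEnding]
  | case3 c h hc h2 =>
    rw [mpeSolve, dif_neg h]
    simp only [List.mem_cons, List.not_mem_nil, or_false, not_or] at hc
    simp [mpeEnding, hc.1, hc.2.1, hc.2.2]
  | case4 s h h2 hne =>
    have hnil : s = [] := by
      cases s with
      | nil => rfl
      | cons a t =>
        cases t with
        | nil => exact absurd rfl (fun he => hne a h2 he (by rfl))
        | cons b u => exact absurd (by simp) h
    subst hnil
    rw [mpeSolve]
    simp [mpeEnding]

-- ===== VERDICT (by name: the statement is the Claim_ definition above) =====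
theorem move_punctuation_ending_spec : Claim_equal_move_punctuation_ending := by
  intro word _
  unfold Spec_move_punctuation_ending move_punctuation_ending move_punctuation_ending_alt
  rw [mpe_loop, mpeSolve_eq]
  simp only [List.nil_append, mpeEnding]
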